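-- pv_equiv track=rewrite | github.com/orujahmadov/Modified-MNIST | trainer/predictor.py | apply_operation
-- ===== SOURCE A (Python) =====
-- def apply_operation(characters):
--     result = 0
--     if (12 in characters):
--         result = 1
--         for character in characters:
--             if (character != 12):
--                 result*=character
--     else:
--         result = 0
--         for character in characters:
--             if (character != 10 and character !=11):
--                 result+=character
--
--     return result
-- ===== SOURCE B (Python) =====
-- def apply_operation(characters):
--     has12 = False
--     factors = []
--     s = 0
--     for c in characters:
--         if c == 12:
--             has12 = True
--         else:
--             factors.append(c)
--         if c != 10 and c != 11:
--             s += c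
--     if not has12:
--         return s
--     p = 1
--     for f in factors:
--         p *= f
--     return p
-- ===== Notes on version B (the rewrite author's own statement) =====
-- stated objective: alternative
-- what changed: Single pass building (has12 flag, list of non-12 factors, sum) simultaneously with no membership pre-scan, then selecting the sum or multiplying the collected factors at the end.
import Mathlib
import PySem

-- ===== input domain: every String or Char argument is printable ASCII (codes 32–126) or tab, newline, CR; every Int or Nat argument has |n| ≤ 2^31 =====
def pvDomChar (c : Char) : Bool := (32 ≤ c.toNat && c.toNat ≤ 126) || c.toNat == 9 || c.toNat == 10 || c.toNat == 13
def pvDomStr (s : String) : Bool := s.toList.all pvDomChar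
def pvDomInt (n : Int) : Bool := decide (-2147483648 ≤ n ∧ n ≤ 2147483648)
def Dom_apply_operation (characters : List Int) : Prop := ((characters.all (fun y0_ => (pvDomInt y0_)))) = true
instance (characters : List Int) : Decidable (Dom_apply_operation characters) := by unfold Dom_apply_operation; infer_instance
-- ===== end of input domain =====

-- B changes decomposition only: one pass carrying (has12, product, sum) instead of a membership scan plus a second accumulation loop (objective: alternative).

-- ===== PORT A =====
def apply_operation (characters : List Int) : Int :=
  if (12 : Int) ∈ characters then
    characters.foldl (fun result character => if character ≠ 12 then result * character else result) 1
  else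
    characters.foldl (fun result character => if character ≠ 10 ∧ character ≠ 11 then result + character else result) 0

-- ===== PORT B =====
def apply_operation_alt (characters : List Int) : Int :=
  let st := characters.foldl
    (fun (st : Bool × List Int × Int) c =>
      ((if c = 12 then true else st.1),
       (if c = 12 then st.2.1 else st.2.1 ++ [c]),
       (if c ≠ 10 ∧ c ≠ 11 then st.2.2 + c else st.2.2)))
    (false, [], 0)
  if !st.1 then st.2.2
  else st.2.1.foldl (fun p f => p * f) 1

-- ===== PRECONDITION & SPEC =====
def Spec_apply_operation (characters : List Int) (out : Int) : Prop := out = apply_operation_alt characters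
instance (characters : List Int) (out : Int) : Decidable (Spec_apply_operation characters out) := by unfold Spec_apply_operation; infer_instance

-- ===== CLAIM (what is proved, stated in full; the proofs are below) =====
def Claim_equal_apply_operation : Prop := ∀ (characters : List Int), Dom_apply_operation characters → Spec_apply_operation characters (apply_operation characters)

-- ===== LEMMAS AND PROOFS =====
theorem pv_fold_split (l : List Int) (b : Bool) (acc : List Int) (s : Int) :
    l.foldl
      (fun (st : Bool × List Int × Int) c =>
        ((if c = 12 then true else st.1),
         (if c = 12 then st.2.1 else st.2.1 ++ [c]),
         (if c ≠ 10 ∧ c ≠ 11 then st.2.2 + c else st.2.2)))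
      (b, acc, s)
    = ((b || decide ((12 : Int) ∈ l)),
       acc ++ l.filter (fun c => c ≠ 12),
       l.foldl (fun result character => if character ≠ 10 ∧ character ≠ 11 then result + character else result) s) := by
  induction l generalizing b acc s with
  | nil => simp
  | cons x xs ih =>
    simp only [List.foldl_cons, ih, List.mem_cons, List.filter_cons]
    by_cases hx : x = 12 <;> simp [hx, eq_comm]

theorem pv_prod_filter (l : List Int) (p : Int) :
    l.foldl (fun result character => if character ≠ 12 then result * character else result) p
    = (l.filter (fun c => c ≠ 12)).foldl (fun p f => p * f) p := by
  induction l generalizing p with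
  | nil => rfl
  | cons x xs ih =>
    by_cases hx : x = 12
    · simpa [hx] using ih p
    · simpa [hx] using ih (p * x)

theorem apply_operation_eq (characters : List Int) :
    apply_operation characters = apply_operation_alt characters := by
  unfold apply_operation apply_operation_alt
  rw [pv_fold_split, pv_prod_filter]
  by_cases h : (12 : Int) ∈ characters <;> simp [h]

-- ===== VERDICT (by name: the statement is the Claim_ definition above) =====
theorem apply_operation_spec : Claim_equal_apply_operation := by
  intro characters _
  exact apply_operation_eq characters
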